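-- pv_equiv track=rewrite | github.com/galois-search/Internship | DuplicateSequence.py | find_unique_sequences_v5
-- ===== SOURCE A (Python) =====
-- def minimal_rotation(s):
--     """Return the lexicographically smallest rotation of string s."""
--     return min(s[i:] + s[:i] for i in range(len(s)))
--
-- def is_rotation(original, candidate):
--     return len(original) == len(candidate) and candidate in (original + original)
--
-- def find_unique_sequences_v5(ListOfSequence):
--     unique_sequence = []
--     duplicate_sequence1 = []
--     duplicate_sequence2 = []
--     seen_rotations = set()
--
--     for binary_sequence in ListOfSequence:
--         sequence = binary_sequence[0]
--         min_rot = minimal_rotation(sequence)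
--         if min_rot in seen_rotations :
--             if is_rotation(min_rot,unique_sequence[0][0]):
--                 duplicate_sequence1.append(binary_sequence)
--             else:
--                 duplicate_sequence2.append(binary_sequence)
--         else:
--             unique_sequence.append(binary_sequence)
--             seen_rotations.add(min_rot)
--
--     return unique_sequence, duplicate_sequence1,duplicate_sequence2
-- ===== SOURCE B (Python) =====
-- def minimal_rotation(s):
--     """Lexicographically smallest rotation, read off windows of the doubled string."""
--     doubled = s + s
--     n = len(s)
--     best = doubled[0:n]
--     for i in range(1, n):
--         cand = doubled[i:i + n]
--         if cand < best:
--             best = cand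
--     return best
--
-- def is_rotation(original, candidate):
--     return len(original) == len(candidate) and candidate in (original + original)
--
-- def find_unique_sequences_v5(ListOfSequence):
--     canons = [minimal_rotation(x[0]) for x in ListOfSequence]
--     first_at = {}
--     for i, c in enumerate(canons):
--         first_at.setdefault(c, i)
--     pairs = list(zip(ListOfSequence, canons))
--     unique = [x for i, (x, c) in enumerate(pairs) if first_at[c] == i]
--     dup1 = [x for i, (x, c) in enumerate(pairs)
--             if first_at[c] != i and is_rotation(c, ListOfSequence[0][0])]
--     dup2 = [x for i, (x, c) in enumerate(pairs)
--             if first_at[c] != i and not is_rotation(c, ListOfSequence[0][0])]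
--     return unique, dup1, dup2
-- ===== Notes on version B (the rewrite author's own statement) =====
-- stated objective: alternative
-- what changed: B replaces A's single online loop (four mutating accumulators, a seen-set, and a substring rotation test against unique[0] on each duplicate) by a two-pass pipeline: precompute every canonical rotation by scanning windows of the doubled string, build a first-occurrence index dict once, then produce the three output lists as declarative filters over the enumerated input.
import Mathlib
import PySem

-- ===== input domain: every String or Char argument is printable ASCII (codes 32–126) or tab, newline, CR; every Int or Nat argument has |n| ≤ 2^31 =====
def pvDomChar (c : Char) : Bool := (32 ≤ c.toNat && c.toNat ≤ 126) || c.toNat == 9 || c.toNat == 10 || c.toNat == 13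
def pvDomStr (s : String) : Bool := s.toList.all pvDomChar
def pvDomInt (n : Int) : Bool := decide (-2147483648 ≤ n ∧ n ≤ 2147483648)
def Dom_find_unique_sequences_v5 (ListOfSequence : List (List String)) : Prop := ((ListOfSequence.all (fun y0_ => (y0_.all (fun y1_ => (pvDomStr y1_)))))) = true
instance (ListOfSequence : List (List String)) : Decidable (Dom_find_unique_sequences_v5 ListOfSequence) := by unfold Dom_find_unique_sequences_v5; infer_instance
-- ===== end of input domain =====

-- B replaces A's online accumulator loop by a two-pass pipeline (precomputed canonical
-- rotations read off the doubled string, a first-occurrence index, three declarative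
-- filters); same asymptotic cost, different structure ("alternative").

-- ===== PORT A =====
-- min(s[i:] + s[:i] for i in range(len(s)))  (none = ValueError on the empty generator)
def pvMinRot? (s : List Char) : Option (List Char) :=
  PySem.List.min?
    ((PySem.List.pyRange 0 (s.length : Int)).map
      (fun i => PySem.List.slice s (some i) none ++ PySem.List.slice s none (some i)))
    (fun x => x)

-- is_rotation(original, candidate)
def pvIsRotation (original candidate : List Char) : Bool :=
  (original.length == candidate.length) && PySem.Chars.isIn candidate (original ++ original)

-- the body of A's for-loop; state = (unique, dup1, dup2, seen)
def pvStepA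
    (st : List (List String) × List (List String) × List (List String) × PySem.Set (List Char))
    (bs : List String) :
    List (List String) × List (List String) × List (List String) × PySem.Set (List Char) :=
  let sequence := ((PySem.List.pyGet? bs 0).getD "").toList
  let min_rot := (pvMinRot? sequence).getD []
  if PySem.Set.contains st.2.2.2 min_rot then
    if pvIsRotation min_rot (((PySem.List.pyGet? ((PySem.List.pyGet? st.1 0).getD []) 0).getD "").toList) then
      (st.1, st.2.1 ++ [bs], st.2.2.1, st.2.2.2)
    else
      (st.1, st.2.1, st.2.2.1 ++ [bs], st.2.2.2)
  else
    (st.1 ++ [bs], st.2.1, st.2.2.1, PySem.Set.add st.2.2.2 min_rot)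

def find_unique_sequences_v5 (ListOfSequence : List (List String)) :
    List (List String) × List (List String) × List (List String) :=
  let r := ListOfSequence.foldl pvStepA ([], [], [], PySem.Set.empty)
  (r.1, r.2.1, r.2.2.1)

-- ===== PORT B =====
-- B's minimal_rotation: scan the n windows of the doubled string keeping the least
def pvMinRotAlt (s : List Char) : List Char :=
  let doubled := s ++ s
  let n := s.length
  (PySem.List.pyRange 1 (n : Int)).foldl
    (fun best i =>
      let cand := PySem.List.slice doubled (some i) (some (i + (n : Int)))
      if cand < best then cand else best)
    (PySem.List.slice doubled (some 0) (some (n : Int)))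

def find_unique_sequences_v5_alt (ListOfSequence : List (List String)) :
    List (List String) × List (List String) × List (List String) :=
  let canons := ListOfSequence.map (fun x => pvMinRotAlt (((PySem.List.pyGet? x 0).getD "").toList))
  let first_at := (PySem.List.enumerate canons).foldl
      (fun d p => PySem.Dict.setdefault d p.2 p.1) PySem.Dict.empty
  let pairs := ListOfSequence.zip canons
  let l00 := ((PySem.List.pyGet? ((PySem.List.pyGet? ListOfSequence 0).getD []) 0).getD "").toList
  let unique := ((PySem.List.enumerate pairs).filter
      (fun q => first_at.getD q.2.2 0 == q.1)).map (fun q => q.2.1)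
  let dup1 := ((PySem.List.enumerate pairs).filter
      (fun q => (first_at.getD q.2.2 0 != q.1) && pvIsRotation q.2.2 l00)).map (fun q => q.2.1)
  let dup2 := ((PySem.List.enumerate pairs).filter
      (fun q => (first_at.getD q.2.2 0 != q.1) && !(pvIsRotation q.2.2 l00))).map (fun q => q.2.1)
  (unique, dup1, dup2)

-- ===== PRECONDITION & SPEC =====
-- Pre_ excludes exactly the inputs where Python A raises: an empty inner list
-- (IndexError on binary_sequence[0]) or an empty first string (ValueError: min() of
-- an empty sequence of rotations).
def Pre_find_unique_sequences_v5 (ListOfSequence : List (List String)) : Prop :=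
  ∀ bs ∈ ListOfSequence, bs ≠ [] ∧ bs.headD "" ≠ ""
instance (ListOfSequence : List (List String)) : Decidable (Pre_find_unique_sequences_v5 ListOfSequence) := by
  unfold Pre_find_unique_sequences_v5; infer_instance

def pvWitness_find_unique_sequences_v5 : List (List String) :=
  [["ab", "x"], ["ba"], ["aa"], ["ab"]]

def Spec_find_unique_sequences_v5 (ListOfSequence : List (List String))
    (out : List (List String) × List (List String) × List (List String)) : Prop :=
  out = find_unique_sequences_v5_alt ListOfSequence
instance (ListOfSequence : List (List String)) (out : List (List String) × List (List String) × List (List String)) :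
    Decidable (Spec_find_unique_sequences_v5 ListOfSequence out) := by
  unfold Spec_find_unique_sequences_v5; infer_instance

-- ===== CLAIM (what is proved, stated in full; the proofs are below) =====
def Claim_equal_find_unique_sequences_v5 : Prop :=
  ∀ (ListOfSequence : List (List String)), Dom_find_unique_sequences_v5 ListOfSequence →
    Pre_find_unique_sequences_v5 ListOfSequence →
    Spec_find_unique_sequences_v5 ListOfSequence (find_unique_sequences_v5 ListOfSequence)

-- ===== LEMMAS AND PROOFS =====

-- proof-side names for B's intermediate values
def pvCanon (x : List String) : List Char :=
  pvMinRotAlt (((PySem.List.pyGet? x 0).getD "").toList)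

def pvCanons (L : List (List String)) : List (List Char) := L.map pvCanon

def pvFA (cs : List (List Char)) : PySem.Dict (List Char) Int :=
  (PySem.List.enumerate cs).foldl (fun d p => PySem.Dict.setdefault d p.2 p.1) PySem.Dict.empty

def pvHead00 (L : List (List String)) : List Char :=
  ((PySem.List.pyGet? ((PySem.List.pyGet? L 0).getD []) 0).getD "").toList

def pvU (L : List (List String)) : List (List String) :=
  ((PySem.List.enumerate (L.zip (pvCanons L))).filter
      (fun q => (pvFA (pvCanons L)).getD q.2.2 0 == q.1)).map (fun q => q.2.1)

def pvD1 (L : List (List String)) : List (List String) :=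
  ((PySem.List.enumerate (L.zip (pvCanons L))).filter
      (fun q => ((pvFA (pvCanons L)).getD q.2.2 0 != q.1) && pvIsRotation q.2.2 (pvHead00 L))).map (fun q => q.2.1)

def pvD2 (L : List (List String)) : List (List String) :=
  ((PySem.List.enumerate (L.zip (pvCanons L))).filter
      (fun q => ((pvFA (pvCanons L)).getD q.2.2 0 != q.1) && !(pvIsRotation q.2.2 (pvHead00 L)))).map (fun q => q.2.1)

theorem pvAlt_eq (L : List (List String)) :
    find_unique_sequences_v5_alt L = (pvU L, pvD1 L, pvD2 L) := rfl

-- the canonical forms agree: B's window scan equals getD [] of A's min-of-rotations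
theorem pvMin?_cons {a k : Type} [LT k] [DecidableLT k] (key : a -> k) (t : List a) (x : a) :
    PySem.List.min? (x :: t) key = some (t.foldl (fun b c => if key c < key b then c else b) x) := by
  induction t generalizing x with
  | nil => rfl
  | cons a t ih =>
    have h1 : PySem.List.min? (x :: a :: t) key =
        PySem.List.min? ((if key a < key x then a else x) :: t) key := by
      simp only [PySem.List.min?, List.foldl_cons]
      by_cases h : key a < key x <;> simp [h]
    rw [h1, ih, List.foldl_cons]

theorem pvMinRotAlt_eq (s : List Char) : pvMinRotAlt s = (pvMinRot? s).getD [] := by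
  rcases Nat.eq_zero_or_pos s.length with h0 | hpos
  · have hs : s = [] := List.eq_nil_of_length_eq_zero h0
    subst hs; rfl
  · unfold pvMinRotAlt pvMinRot?
    have hlt : (0 : Int) < (s.length : Int) := by exact_mod_cast hpos
    rw [PySem.List.pyRange_one_cons hlt]
    simp only [List.map_cons]
    have h01 : (0 : Int) + 1 = 1 := by norm_num
    rw [h01]
    have hz : PySem.List.slice s (some (0:Int)) none ++ PySem.List.slice s none (some (0:Int)) = s := by
      rw [PySem.List.slice_from s le_rfl, PySem.List.slice_to s le_rfl]
      simp
    rw [hz, pvMin?_cons, Option.getD_some, List.foldl_map]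
    have hinit : PySem.List.slice (s ++ s) (some (0:Int)) (some ((s.length : Int))) = s := by
      rw [PySem.List.slice_toNat (s++s) le_rfl (by positivity)]
      simp
    rw [hinit]
    apply PySem.List.foldl_congr_mem
    intro acc i hi
    rw [PySem.List.mem_pyRange_one] at hi
    obtain ⟨h1, h2⟩ := hi
    have h0i : (0:Int) ≤ i := by omega
    have hwin : PySem.List.slice (s ++ s) (some i) (some (i + (s.length : Int))) =
        PySem.List.slice s (some i) none ++ PySem.List.slice s none (some i) := by
      rw [PySem.List.slice_toNat (s++s) h0i (by omega),
        PySem.List.slice_from s h0i, PySem.List.slice_to s h0i]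
      have hk : i.toNat ≤ s.length := by omega
      have htn : (i + (s.length:Int)).toNat = i.toNat + s.length := by omega
      rw [htn, List.drop_append, List.take_append, List.length_drop]
      have e3 : i.toNat + s.length - i.toNat - (s.length - i.toNat) = i.toNat := by omega
      have e1 : i.toNat + s.length - i.toNat = s.length := by omega
      have e2 : i.toNat - s.length = 0 := by omega
      rw [e3, e1, e2, List.drop_zero]
      congr 1
      apply List.take_of_length_le
      simp
    rw [hwin]

-- the first-occurrence dict is index?
theorem pvFA_go (cs : List (List Char)) (s : Int) (d : PySem.Dict (List Char) Int) (c : List Char) :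
    ((PySem.List.enumerate cs s).foldl (fun d p => PySem.Dict.setdefault d p.2 p.1) d).get? c =
      if d.contains c then d.get? c else (PySem.List.index? cs c).map (fun k : Nat => s + (k : Int)) := by
  induction cs generalizing s d with
  | nil =>
    simp only [PySem.List.enumerate, List.foldl_nil]
    split_ifs with h
    · rfl
    · simp [PySem.List.index?, (PySem.Dict.get?_eq_none_iff_contains d c).2 (by simpa using h)]
  | cons a t ih =>
    have hstep : PySem.List.enumerate (a :: t) s = (s, a) :: PySem.List.enumerate t (s + 1) := rfl
    rw [hstep, List.foldl_cons, ih]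
    by_cases hac : a = c
    · subst hac
      by_cases hc : d.contains a
      · rw [PySem.Dict.setdefault_of_contains d s hc]
        simp [hc]
      · have hc' : (d.setdefault a s).contains a = true := by
          simp [PySem.Dict.contains_setdefault]
        rw [if_pos hc', PySem.Dict.get?_setdefault_self, if_neg (by simp [hc]),
          PySem.List.index?_cons_self]
        have : d.get? a = none := (PySem.Dict.get?_eq_none_iff_contains d a).2 (by simpa using hc)
        simp [this]
    · have hca : ¬ c = a := fun h => hac h.symm
      have hcontains : (d.setdefault a s).contains c = d.contains c := by
        simp [PySem.Dict.contains_setdefault, hca]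
      rw [hcontains, PySem.Dict.get?_setdefault_of_ne d s hca,
        PySem.List.index?_cons_of_ne t hac]
      split_ifs with h
      · rfl
      · rw [Option.map_map]
        congr 1
        funext k
        simp
        ring

theorem pvFA_get? (cs : List (List Char)) (c : List Char) :
    (pvFA cs).get? c = (PySem.List.index? cs c).map (fun k : Nat => (k : Int)) := by
  unfold pvFA
  rw [pvFA_go]
  simp [PySem.Dict.contains_empty]

theorem pvEnum_append {a : Type} (xs ys : List a) (s : Int) :
    PySem.List.enumerate (xs ++ ys) s =
      PySem.List.enumerate xs s ++ PySem.List.enumerate ys (s + xs.length) := by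
  induction xs generalizing s with
  | nil => simp [PySem.List.enumerate]
  | cons a t ih => simp [PySem.List.enumerate, ih, add_assoc]; ring_nf

theorem pvCanons_append (L : List (List String)) (x : List String) :
    pvCanons (L ++ [x]) = pvCanons L ++ [pvCanon x] := by
  simp [pvCanons]

theorem pvLenCanons (L : List (List String)) : (pvCanons L).length = L.length := by
  simp [pvCanons]

theorem pvEnumZip_append (L : List (List String)) (x : List String) :
    PySem.List.enumerate ((L ++ [x]).zip (pvCanons (L ++ [x]))) 0 =
      PySem.List.enumerate (L.zip (pvCanons L)) 0 ++ [((L.length : Int), (x, pvCanon x))] := by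
  rw [pvCanons_append, List.zip_append (by rw [pvLenCanons]), pvEnum_append]
  congr 1
  simp [PySem.List.enumerate, pvLenCanons, List.length_zip]

-- the appended dict agrees with the old one on old canonicals
theorem pvFA_getD_old (cs : List (List Char)) (c c' : List Char) (h : c' ∈ cs) :
    (pvFA (cs ++ [c])).getD c' 0 = (pvFA cs).getD c' 0 := by
  rw [PySem.Dict.getD_eq_get?_getD, PySem.Dict.getD_eq_get?_getD, pvFA_get?, pvFA_get?,
    PySem.List.index?_append_of_mem [c] h]

-- q ∈ enumerate (zip L canons) has a canonical that occurs in canons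
theorem pvMemCanons (L : List (List String)) (q : Int × (List String × List Char))
    (hq : q ∈ PySem.List.enumerate (L.zip (pvCanons L)) 0) : q.2.2 ∈ pvCanons L := by
  rw [PySem.List.mem_enumerate_iff] at hq
  obtain ⟨k, hk, rfl⟩ := hq
  have hk2 : k < (pvCanons L).length := by
    rw [pvLenCanons]; rw [List.length_zip, pvLenCanons] at hk; omega
  have : (L.zip (pvCanons L))[k].2 = (pvCanons L)[k] := by
    rw [List.getElem_zip]
  rw [this]
  exact List.getElem_mem hk2

-- condition value at the appended element
theorem pvFA_last_mem (cs : List (List Char)) (c : List Char) (h : c ∈ cs) :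
    ((pvFA (cs ++ [c])).getD c 0 == (cs.length : Int)) = false := by
  rw [PySem.Dict.getD_eq_get?_getD, pvFA_get?, PySem.List.index?_append_of_mem [c] h]
  obtain ⟨k, hk⟩ := Option.isSome_iff_exists.1 ((PySem.List.index?_isSome_iff cs c).2 h)
  obtain ⟨hklt, -, -⟩ := PySem.List.getElem_of_index?_eq_some hk
  rw [hk]
  simp only [Option.map_some, Option.getD_some, beq_eq_false_iff_ne, ne_eq, Int.natCast_inj]
  omega

theorem pvFA_last_not (cs : List (List Char)) (c : List Char) (h : c ∉ cs) :
    ((pvFA (cs ++ [c])).getD c 0 == (cs.length : Int)) = true := by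
  rw [PySem.Dict.getD_eq_get?_getD, pvFA_get?, PySem.List.index?_append_singleton_self cs c h]
  simp

theorem pvHead00_append (L : List (List String)) (x : List String) (h : L ≠ []) :
    pvHead00 (L ++ [x]) = pvHead00 L := by
  unfold pvHead00
  have h0 : ((0:Int)) = ((0:Nat):Int) := by norm_num
  rw [h0]
  simp only [PySem.List.pyGet?_natCast]
  rw [List.getElem?_append_left (by cases L with | nil => exact absurd rfl h | cons a t => simp)]

theorem pvU_append (L : List (List String)) (x : List String) :
    pvU (L ++ [x]) = pvU L ++ (if pvCanon x ∈ pvCanons L then [] else [x]) := by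
  unfold pvU
  rw [pvEnumZip_append, List.filter_append, List.map_append, pvCanons_append]
  congr 1
  · congr 1
    apply List.filter_congr
    intro q hq
    rw [pvFA_getD_old _ _ _ (pvMemCanons L q hq)]
  · by_cases h : pvCanon x ∈ pvCanons L
    · rw [if_pos h]
      simp only [List.filter_cons, List.filter_nil]
      have hm := pvFA_last_mem (pvCanons L) (pvCanon x) h
      rw [pvLenCanons] at hm
      rw [hm]
      simp
    · rw [if_neg h]
      simp only [List.filter_cons, List.filter_nil]
      have hm := pvFA_last_not (pvCanons L) (pvCanon x) h
      rw [pvLenCanons] at hm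
      rw [hm]
      simp

theorem pvD1_append (L : List (List String)) (x : List String) :
    pvD1 (L ++ [x]) = pvD1 L ++
      (if pvCanon x ∈ pvCanons L ∧ pvIsRotation (pvCanon x) (pvHead00 L) = true then [x] else []) := by
  unfold pvD1
  rcases List.eq_nil_or_concat' L with rfl | hL
  · simp only [List.nil_append, pvCanons, List.map_cons, List.map_nil]
    have : pvCanon x ∉ ([] : List (List Char)) := by simp
    rw [if_neg (by simp)]
    simp only [List.append_nil]
    have hz : ([x].zip [pvCanon x]) = [(x, pvCanon x)] := rfl
    rw [hz]
    have he : PySem.List.enumerate [(x, pvCanon x)] 0 = [((0:Int), (x, pvCanon x))] := rfl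
    rw [he, List.filter_cons]
    have hc : (pvFA [pvCanon x]).getD (pvCanon x) 0 = (0:Int) := by
      rw [PySem.Dict.getD_eq_get?_getD, pvFA_get?, PySem.List.index?_cons_self]
      simp
    simp [hc]
  · have hLne : L ≠ [] := by rcases hL with ⟨l', a, rfl⟩; simp
    rw [pvEnumZip_append, List.filter_append, List.map_append, pvCanons_append,
      pvHead00_append L x hLne]
    congr 1
    · congr 1
      apply List.filter_congr
      intro q hq
      rw [pvFA_getD_old _ _ _ (pvMemCanons L q hq)]
    · by_cases h : pvCanon x ∈ pvCanons L
      · simp only [List.filter_cons, List.filter_nil]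
        have hm := pvFA_last_mem (pvCanons L) (pvCanon x) h
        rw [pvLenCanons] at hm
        rw [show ((pvFA (pvCanons L ++ [pvCanon x])).getD (pvCanon x) 0 != (L.length : Int)) = true by
          simp only [bne]; rw [hm]; rfl]
        by_cases hr : pvIsRotation (pvCanon x) (pvHead00 L) = true
        · have hcond : pvCanon x ∈ pvCanons L ∧ pvIsRotation (pvCanon x) (pvHead00 L) = true := ⟨h, hr⟩
          rw [if_pos hcond]
          simp [hr]
        · have hcond : ¬ (pvCanon x ∈ pvCanons L ∧ pvIsRotation (pvCanon x) (pvHead00 L) = true) :=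
            fun hc => hr hc.2
          rw [if_neg hcond]
          simp [hr]
      · rw [if_neg (by tauto)]
        simp only [List.filter_cons, List.filter_nil]
        have hm := pvFA_last_not (pvCanons L) (pvCanon x) h
        rw [pvLenCanons] at hm
        rw [show ((pvFA (pvCanons L ++ [pvCanon x])).getD (pvCanon x) 0 != (L.length : Int)) = false by
          simp only [bne]; rw [hm]; rfl]
        simp

theorem pvD2_append (L : List (List String)) (x : List String) :
    pvD2 (L ++ [x]) = pvD2 L ++
      (if pvCanon x ∈ pvCanons L ∧ ¬ pvIsRotation (pvCanon x) (pvHead00 L) = true then [x] else []) := by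
  unfold pvD2
  rcases List.eq_nil_or_concat' L with rfl | hL
  · simp only [List.nil_append, pvCanons, List.map_cons, List.map_nil]
    rw [if_neg (by simp)]
    simp only [List.append_nil]
    have hz : ([x].zip [pvCanon x]) = [(x, pvCanon x)] := rfl
    rw [hz]
    have he : PySem.List.enumerate [(x, pvCanon x)] 0 = [((0:Int), (x, pvCanon x))] := rfl
    rw [he, List.filter_cons]
    have hc : (pvFA [pvCanon x]).getD (pvCanon x) 0 = (0:Int) := by
      rw [PySem.Dict.getD_eq_get?_getD, pvFA_get?, PySem.List.index?_cons_self]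
      simp
    simp [hc]
  · have hLne : L ≠ [] := by rcases hL with ⟨l', a, rfl⟩; simp
    rw [pvEnumZip_append, List.filter_append, List.map_append, pvCanons_append,
      pvHead00_append L x hLne]
    congr 1
    · congr 1
      apply List.filter_congr
      intro q hq
      rw [pvFA_getD_old _ _ _ (pvMemCanons L q hq)]
    · by_cases h : pvCanon x ∈ pvCanons L
      · simp only [List.filter_cons, List.filter_nil]
        have hm := pvFA_last_mem (pvCanons L) (pvCanon x) h
        rw [pvLenCanons] at hm
        rw [show ((pvFA (pvCanons L ++ [pvCanon x])).getD (pvCanon x) 0 != (L.length : Int)) = true by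
          simp only [bne]; rw [hm]; rfl]
        by_cases hr : pvIsRotation (pvCanon x) (pvHead00 L) = true
        · have hcond : ¬ (pvCanon x ∈ pvCanons L ∧ ¬ pvIsRotation (pvCanon x) (pvHead00 L) = true) :=
            fun hc => hc.2 hr
          rw [if_neg hcond]
          simp [hr]
        · have hcond : pvCanon x ∈ pvCanons L ∧ ¬ pvIsRotation (pvCanon x) (pvHead00 L) = true := ⟨h, hr⟩
          rw [if_pos hcond]
          simp [hr]
      · rw [if_neg (by tauto)]
        simp only [List.filter_cons, List.filter_nil]
        have hm := pvFA_last_not (pvCanons L) (pvCanon x) h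
        rw [pvLenCanons] at hm
        rw [show ((pvFA (pvCanons L ++ [pvCanon x])).getD (pvCanon x) 0 != (L.length : Int)) = false by
          simp only [bne]; rw [hm]; rfl]
        simp

theorem pvMain (L : List (List String)) :
    L.foldl pvStepA ([], [], [], PySem.Set.empty) =
      (pvU L, pvD1 L, pvD2 L, PySem.Set.ofList (pvCanons L)) ∧
    (L.foldl pvStepA ([], [], [], PySem.Set.empty)).1.head? = L.head? := by
  induction L using List.reverseRecOn with
  | nil => exact ⟨rfl, rfl⟩
  | append_singleton L x ih =>
    obtain ⟨ih1, ih2⟩ := ih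
    rw [List.foldl_append, List.foldl_cons, List.foldl_nil, ih1]
    have hm : ((pvMinRot? (((PySem.List.pyGet? x 0).getD "").toList)).getD []) = pvCanon x := by
      rw [← pvMinRotAlt_eq]; rfl
    constructor
    · unfold pvStepA
      simp only [hm]
      rw [pvU_append, pvD1_append, pvD2_append, pvCanons_append,
        PySem.Set.ofList_append_singleton]
      by_cases h : pvCanon x ∈ pvCanons L
      · have hcontains : PySem.Set.contains (PySem.Set.ofList (pvCanons L)) (pvCanon x) = true :=
          (PySem.Set.contains_iff _ _).2 ((PySem.Set.mem_ofList _ _).2 h)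
        rw [if_pos hcontains]
        have hu : (pvU L, pvD1 L, pvD2 L, PySem.Set.ofList (pvCanons L)).1 = pvU L := rfl
        have hh : (((PySem.List.pyGet? ((PySem.List.pyGet? (pvU L, pvD1 L, pvD2 L,
            PySem.Set.ofList (pvCanons L)).1 0).getD []) 0).getD "").toList) = pvHead00 L := by
          rw [hu]
          unfold pvHead00
          have h0 : ((0:Int)) = ((0:Nat):Int) := by norm_num
          rw [h0]
          simp only [PySem.List.pyGet?_natCast]
          have hUL : (pvU L)[0]? = L[0]? := by
            rw [← List.head?_eq_getElem?, ← List.head?_eq_getElem?]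
            rw [ih1] at ih2
            exact ih2
          rw [hUL]
        rw [hh]
        rw [PySem.Set.add_of_mem ((PySem.Set.mem_ofList _ _).2 h)]
        by_cases hr : pvIsRotation (pvCanon x) (pvHead00 L) = true
        · have hc1 : pvCanon x ∈ pvCanons L ∧ pvIsRotation (pvCanon x) (pvHead00 L) = true := ⟨h, hr⟩
          have hc2 : ¬ (pvCanon x ∈ pvCanons L ∧ ¬ pvIsRotation (pvCanon x) (pvHead00 L) = true) :=
            fun hc => hc.2 hr
          rw [if_pos hr, if_pos hc1, if_neg hc2, if_pos h]
          simp
        · have hc1 : ¬ (pvCanon x ∈ pvCanons L ∧ pvIsRotation (pvCanon x) (pvHead00 L) = true) :=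
            fun hc => hr hc.2
          have hc2 : pvCanon x ∈ pvCanons L ∧ ¬ pvIsRotation (pvCanon x) (pvHead00 L) = true := ⟨h, hr⟩
          rw [if_neg hr, if_neg hc1, if_pos hc2, if_pos h]
          simp
      · have hcontains : PySem.Set.contains (PySem.Set.ofList (pvCanons L)) (pvCanon x) = false := by
          rw [← Bool.not_eq_true]
          intro hcon
          exact h ((PySem.Set.mem_ofList _ _).1 ((PySem.Set.contains_iff _ _).1 hcon))
        have hcA : ¬ (PySem.Set.contains (PySem.Set.ofList (pvCanons L)) (pvCanon x) = true) :=
          fun hc => h ((PySem.Set.mem_ofList _ _).1 ((PySem.Set.contains_iff _ _).1 hc))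
        have hc1 : ¬ (pvCanon x ∈ pvCanons L ∧ pvIsRotation (pvCanon x) (pvHead00 L) = true) :=
          fun hc => h hc.1
        have hc2 : ¬ (pvCanon x ∈ pvCanons L ∧ ¬ pvIsRotation (pvCanon x) (pvHead00 L) = true) :=
          fun hc => h hc.1
        rw [if_neg hcA, if_neg h, if_neg hc1, if_neg hc2]
        simp
    · unfold pvStepA
      simp only [hm]
      have hU : (pvU L).head? = L.head? := by
        rw [ih1] at ih2
        exact ih2
      by_cases h : pvCanon x ∈ pvCanons L
      · have hLne : L ≠ [] := by
          intro hnil; subst hnil; simp [pvCanons] at h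
        have hcontains : PySem.Set.contains (PySem.Set.ofList (pvCanons L)) (pvCanon x) = true :=
          (PySem.Set.contains_iff _ _).2 ((PySem.Set.mem_ofList _ _).2 h)
        rw [if_pos hcontains]
        have hgoal : (pvU L).head? = (L ++ [x]).head? := by
          rw [List.head?_append, hU]
          cases hL : L.head? with
          | none => exact absurd (List.head?_eq_none_iff.1 hL) hLne
          | some a => rfl
        split_ifs <;> exact hgoal
      · have hcontains : PySem.Set.contains (PySem.Set.ofList (pvCanons L)) (pvCanon x) = false := by
          rw [← Bool.not_eq_true]
          intro hcon
          exact h ((PySem.Set.mem_ofList _ _).1 ((PySem.Set.contains_iff _ _).1 hcon))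
        have hcA : ¬ (PySem.Set.contains (PySem.Set.ofList (pvCanons L)) (pvCanon x) = true) :=
          fun hc => h ((PySem.Set.mem_ofList _ _).1 ((PySem.Set.contains_iff _ _).1 hc))
        rw [if_neg hcA]
        show (pvU L ++ [x]).head? = (L ++ [x]).head?
        rw [List.head?_append, List.head?_append, hU]

-- ===== VERDICT (by name: the statement is the Claim_ definition above) =====
theorem find_unique_sequences_v5_spec : Claim_equal_find_unique_sequences_v5 := by
  intro L _ _
  unfold Spec_find_unique_sequences_v5 find_unique_sequences_v5
  rw [pvAlt_eq, (pvMain L).1]
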